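-- pv_equiv track=rewrite | github.com/qraccess/knowledge-base-youtube-gpt | user_query.py | limit_context_length
-- ===== SOURCE A (Python) =====
-- def limit_context_length(context, max_length=3000):
--     """
--     限制文本列表的总长度不超过指定的最大值。
--     :param context: 文本列表。
--     :param max_length: 最大长度限制，默认为3000。
--     :return: 截取到的前n个文本段落。
--     """
--     # 获取每个文本段落的长度。
--     paragraph_lengths = [len(paragraph) for paragraph in context]
--
--     total_length = sum(paragraph_lengths)
--     if total_length <= max_length:
--         # 如果总长度小于等于最大长度限制，则不需要截断文本。
--         return context
--
--     # 如果总长度超过最大长度限制，则截取到前n个文本段落。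
--     current_length = 0
--     for index, length in enumerate(paragraph_lengths):
--         current_length += length
--         if current_length > max_length:
--             # 切片复制新的列表，并返回截取到的前n个文本段落。
--             return context[:index]
--
--     # 如果所有的文本段落都被包含，则返回整个文本列表。
--     return context
-- ===== SOURCE B (Python) =====
-- def limit_context_length(context, max_length=3000):
--     # Build the inclusive cumulative-length table once, then binary-search it
--     # for the cutoff: the count of leading paragraphs whose cumulative length
--     # stays <= max_length.
--     cumsum = []
--     total = 0
--     for paragraph in context:
--         total += len(paragraph)
--         cumsum.append(total)
--     # binary search: first index whose cumulative length exceeds max_length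
--     lo, hi = 0, len(cumsum)
--     while lo < hi:
--         mid = (lo + hi) // 2
--         if cumsum[mid] <= max_length:
--             lo = mid + 1
--         else:
--             hi = mid
--     if lo == len(context):
--         return context
--     return context[:lo]
-- ===== Notes on version B (the rewrite author's own statement) =====
-- stated objective: alternative
-- what changed: B builds the inclusive cumulative-length table once and binary-searches it for the cutoff index, instead of A's total-sum check followed by a linear scan with a running accumulator and early return.
import Mathlib
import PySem

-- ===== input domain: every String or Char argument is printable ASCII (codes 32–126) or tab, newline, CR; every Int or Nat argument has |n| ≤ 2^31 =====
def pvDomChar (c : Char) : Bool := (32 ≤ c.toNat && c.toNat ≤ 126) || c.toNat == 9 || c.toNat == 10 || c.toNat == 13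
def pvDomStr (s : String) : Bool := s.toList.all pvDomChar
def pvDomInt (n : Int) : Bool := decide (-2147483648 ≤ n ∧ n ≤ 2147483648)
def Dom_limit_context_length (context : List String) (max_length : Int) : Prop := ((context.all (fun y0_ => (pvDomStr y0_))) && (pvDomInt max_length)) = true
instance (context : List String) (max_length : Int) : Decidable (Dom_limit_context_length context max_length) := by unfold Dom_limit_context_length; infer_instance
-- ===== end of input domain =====

-- B replaces A's total-sum check + linear scan with a cumulative-length table and a
-- binary search for the cutoff index (alternative decomposition, same asymptotic cost).


-- ===== PORT A =====
-- the 'for index, length in enumerate(paragraph_lengths)' loop with early return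
def pvAGo (context : List String) (max_length : Int) :
    List Int → Nat → Int → List String
  | [], _, _ => context                      -- loop finishes: return context
  | length :: rest, index, current_length =>
      let current_length := current_length + length
      if current_length > max_length then
        PySem.List.slice context none (some (index : Int))   -- context[:index]
      else
        pvAGo context max_length rest (index + 1) current_length

def limit_context_length (context : List String) (max_length : Int) : List String :=
  let paragraph_lengths := context.map (fun paragraph => PySem.Str.len paragraph)
  let total_length := paragraph_lengths.foldl (· + ·) 0
  if total_length ≤ max_length then context
  else pvAGo context max_length paragraph_lengths 0 0

-- ===== PORT B =====
-- build the inclusive cumulative-length table (B's first loop)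
def pvCum (acc : List Int) (total : Int) : List String → List Int
  | [] => acc
  | paragraph :: rest =>
      let total := total + PySem.Str.len paragraph
      pvCum (acc ++ [total]) total rest

-- binary search: first index whose cumulative length exceeds max_length
-- (mid is always < cumsum.length, so getD is exact for cumsum[mid])
def pvBs (cumsum : List Int) (max_length : Int) (lo hi : Nat) : Nat :=
  if h : lo < hi then
    let mid := (lo + hi) / 2
    if cumsum.getD mid 0 ≤ max_length then
      pvBs cumsum max_length (mid + 1) hi
    else
      pvBs cumsum max_length lo mid
  else lo
termination_by hi - lo
decreasing_by all_goals omega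

def limit_context_length_alt (context : List String) (max_length : Int) : List String :=
  let cumsum := pvCum [] 0 context
  let lo := pvBs cumsum max_length 0 cumsum.length
  if lo = context.length then context
  else PySem.List.slice context none (some (lo : Int))   -- context[:lo]

-- ===== PRECONDITION & SPEC =====
def Spec_limit_context_length (context : List String) (max_length : Int) (out : List String) : Prop := out = limit_context_length_alt context max_length
instance (context : List String) (max_length : Int) (out : List String) : Decidable (Spec_limit_context_length context max_length out) := by unfold Spec_limit_context_length; infer_instance

-- ===== CLAIM (what is proved, stated in full; the proofs are below) =====
def Claim_equal_limit_context_length : Prop := ∀ (context : List String) (max_length : Int), Dom_limit_context_length context max_length → Spec_limit_context_length context max_length (limit_context_length context max_length)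

-- ===== LEMMAS AND PROOFS =====

-- the cutoff: number of leading lengths whose running sum stays ≤ max
def pvCnt (max : Int) : Int → List Int → Nat
  | _, [] => 0
  | cur, l :: rest => if cur + l > max then 0 else 1 + pvCnt max (cur + l) rest

-- exclusive-start cumulative sums, as pvCum produces them
def pvCums (t : Int) : List Int → List Int
  | [] => []
  | l :: rest => (t + l) :: pvCums (t + l) rest

theorem pvCum_eq (ps : List String) : ∀ (acc : List Int) (t : Int),
    pvCum acc t ps = acc ++ pvCums t (ps.map PySem.Str.len) := by
  induction ps with
  | nil => intro acc t; simp [pvCum, pvCums]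
  | cons p rest ih =>
      intro acc t
      simp only [pvCum, List.map_cons, pvCums]
      rw [ih]
      simp

theorem pvCums_length (l : List Int) : ∀ t, (pvCums t l).length = l.length := by
  induction l with
  | nil => intro t; rfl
  | cons x rest ih => intro t; simp [pvCums, ih]

theorem pvCums_getD (l : List Int) : ∀ (t : Int) (i : Nat), i < l.length →
    (pvCums t l).getD i 0 = t + (l.take (i + 1)).sum := by
  induction l with
  | nil => intro t i h; simp at h
  | cons x rest ih =>
      intro t i h
      cases i with
      | zero => simp [pvCums]
      | succ i =>
          simp only [pvCums, List.getD_cons_succ, List.take_succ_cons, List.sum_cons]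
          rw [ih (t + x) i (by simpa using h)]
          ring

theorem pvSumTakeMono (l : List Int) (hn : ∀ x ∈ l, 0 ≤ x) :
    ∀ i j, i ≤ j → (l.take i).sum ≤ (l.take j).sum := by
  induction l with
  | nil => intro i j _; simp
  | cons x rest ih =>
      intro i j hij
      cases i with
      | zero =>
          cases j with
          | zero => simp
          | succ j =>
              simp only [List.take_zero, List.sum_nil, List.take_succ_cons, List.sum_cons]
              have h1 : 0 ≤ x := hn x (by simp)
              have h2 : (0 : Int) ≤ (rest.take j).sum := by
                have := ih (fun y hy => hn y (by simp [hy])) 0 j (Nat.zero_le _)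
                simpa using this
              omega
      | succ i =>
          cases j with
          | zero => omega
          | succ j =>
              simp only [List.take_succ_cons, List.sum_cons]
              have := ih (fun y hy => hn y (by simp [hy])) i j (by omega)
              omega

-- monotonicity of the cumulative table (lengths are nonnegative)
theorem pvCums_mono (l : List Int) (hn : ∀ x ∈ l, 0 ≤ x) (t : Int) (i j : Nat)
    (hij : i ≤ j) (hj : j < l.length) :
    (pvCums t l).getD i 0 ≤ (pvCums t l).getD j 0 := by
  rw [pvCums_getD l t i (by omega), pvCums_getD l t j hj]
  have := pvSumTakeMono l hn (i + 1) (j + 1) (by omega)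
  omega

-- characterisation of pvCnt against prefix sums
theorem pvCnt_le (max : Int) (l : List Int) : ∀ cur, pvCnt max cur l ≤ l.length := by
  induction l with
  | nil => intro cur; simp [pvCnt]
  | cons x rest ih =>
      intro cur
      simp only [pvCnt, List.length_cons]
      split
      · omega
      · have := ih (cur + x); omega

theorem pvCnt_lt_then (max : Int) (l : List Int) : ∀ cur i, i < pvCnt max cur l →
    cur + (l.take (i + 1)).sum ≤ max := by
  induction l with
  | nil => intro cur i h; simp [pvCnt] at h
  | cons x rest ih =>
      intro cur i h
      simp only [pvCnt] at h
      split at h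
      · omega
      · rename_i hle
        cases i with
        | zero => simp; omega
        | succ i =>
            simp only [List.take_succ_cons, List.sum_cons]
            have := ih (cur + x) i (by omega)
            omega

theorem pvCnt_at (max : Int) (l : List Int) : ∀ cur, pvCnt max cur l < l.length →
    max < cur + (l.take (pvCnt max cur l + 1)).sum := by
  induction l with
  | nil => intro cur h; simp [pvCnt] at h
  | cons x rest ih =>
      intro cur h
      simp only [pvCnt, List.length_cons] at h ⊢
      by_cases hgt : cur + x > max
      · rw [if_pos hgt] at h ⊢; simp; omega
      · rw [if_neg hgt] at h ⊢
        have hih := ih (cur + x) (by omega)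
        have h2 : 1 + pvCnt max (cur + x) rest + 1 = (pvCnt max (cur + x) rest + 1) + 1 := by omega
        rw [h2, List.take_succ_cons, List.sum_cons]
        omega

-- if everything fits, the cutoff is the whole list
theorem pvCnt_full (max : Int) (l : List Int) (hn : ∀ x ∈ l, 0 ≤ x) :
    ∀ cur, cur + l.sum ≤ max → pvCnt max cur l = l.length := by
  induction l with
  | nil => intro cur _; rfl
  | cons x rest ih =>
      intro cur h
      have hx : 0 ≤ x := hn x (by simp)
      have hr : (0 : Int) ≤ rest.sum := List.sum_nonneg (fun y hy => hn y (by simp [hy]))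
      simp only [List.sum_cons] at h
      simp only [pvCnt, List.length_cons]
      rw [if_neg (by omega), ih (fun y hy => hn y (by simp [hy])) (cur + x) (by omega)]
      omega

-- if the total exceeds max, the cutoff is strictly inside the list
theorem pvCnt_partial (max : Int) (l : List Int) :
    ∀ cur, l ≠ [] → max < cur + l.sum → pvCnt max cur l < l.length := by
  induction l with
  | nil => intro cur hne _; exact absurd rfl hne
  | cons x rest ih =>
      intro cur _ h
      simp only [List.sum_cons] at h
      simp only [pvCnt, List.length_cons]
      by_cases hgt : cur + x > max
      · rw [if_pos hgt]; omega
      · rw [if_neg hgt]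
        have hrest : rest ≠ [] := by
          intro he; rw [he] at h; simp at h; omega
        have := ih (cur + x) hrest (by omega)
        omega

-- the A-loop returns the slice at index + cutoff (or the whole context)
theorem pvAGo_eq (context : List String) (max : Int) (l : List Int) :
    ∀ (idx : Nat) (cur : Int),
    pvAGo context max l idx cur =
      if pvCnt max cur l < l.length then
        PySem.List.slice context none (some ((idx + pvCnt max cur l : Nat) : Int))
      else context := by
  induction l with
  | nil => intro idx cur; simp [pvAGo, pvCnt]
  | cons x rest ih =>
      intro idx cur
      simp only [pvAGo, pvCnt, List.length_cons]
      by_cases hgt : cur + x > max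
      · rw [if_pos hgt, if_pos hgt, if_pos (by omega)]
        simp
      · rw [if_neg hgt, if_neg hgt, ih (idx + 1) (cur + x)]
        by_cases hlt : pvCnt max (cur + x) rest < rest.length
        · rw [if_pos hlt, if_pos (by omega)]
          congr 2
          omega
        · rw [if_neg hlt, if_neg (by omega)]

-- binary-search invariant: pvBs lands on the unique boundary of a monotone predicate
theorem pvBs_inv (cs : List Int) (max : Int)
    (mono : ∀ i j, i ≤ j → j < cs.length → cs.getD i 0 ≤ cs.getD j 0) :
    ∀ n lo hi, hi - lo = n → lo ≤ hi → hi ≤ cs.length →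
    (∀ i, i < lo → cs.getD i 0 ≤ max) →
    (∀ i, hi ≤ i → i < cs.length → max < cs.getD i 0) →
    (∀ i, i < pvBs cs max lo hi → cs.getD i 0 ≤ max) ∧
    (∀ i, pvBs cs max lo hi ≤ i → i < cs.length → max < cs.getD i 0) ∧
    pvBs cs max lo hi ≤ cs.length := by
  intro n
  induction n using Nat.strong_induction_on with
  | _ n ihn =>
      intro lo hi hn hlohi hhi hlo hhi2
      rw [pvBs]
      by_cases h : lo < hi
      · rw [dif_pos h]
        simp only
        by_cases hmid : cs.getD ((lo + hi) / 2) 0 ≤ max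
        · rw [if_pos hmid]
          refine ihn (hi - ((lo + hi) / 2 + 1)) (by omega) _ _ rfl (by omega) hhi ?_ hhi2
          intro i hi2
          exact le_trans (mono i ((lo + hi) / 2) (by omega) (by omega)) hmid
        · rw [if_neg hmid]
          refine ihn ((lo + hi) / 2 - lo) (by omega) _ _ rfl (by omega) (by omega) hlo ?_
          intro i hi2 hi3
          have := mono ((lo + hi) / 2) i hi2 hi3
          omega
      · rw [dif_neg h]
        exact ⟨hlo, fun i hi2 hi3 => hhi2 i (by omega) hi3, by omega⟩

-- pvBs over the cumulative table computes exactly the cutoff pvCnt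
theorem pvBs_eq_cnt (l : List Int) (max : Int) (hn : ∀ x ∈ l, 0 ≤ x) :
    pvBs (pvCums 0 l) max 0 (pvCums 0 l).length = pvCnt max 0 l := by
  set cs := pvCums 0 l with hcs
  have hlen : cs.length = l.length := pvCums_length l 0
  have mono : ∀ i j, i ≤ j → j < cs.length → cs.getD i 0 ≤ cs.getD j 0 := by
    intro i j hij hj
    exact pvCums_mono l hn 0 i j hij (by omega)
  obtain ⟨h1, h2, h3⟩ := pvBs_inv cs max mono cs.length 0 cs.length rfl (by omega)
    (le_refl _) (by omega) (by intro i h _; omega)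
  set r := pvBs cs max 0 cs.length with hr
  -- cs.getD i 0 ≤ max ↔ prefix-sum test; compare with pvCnt's characterisation
  by_contra hne
  rcases Nat.lt_or_ge r (pvCnt max 0 l) with hlt | hge
  · -- r < cnt: prefix at r fits (pvCnt_lt_then) but h2 says it exceeds
    have hcle := pvCnt_le max l 0
    have hfit := pvCnt_lt_then max l 0 r hlt
    have hrlen : r < cs.length := by omega
    have := h2 r (le_refl _) hrlen
    rw [hcs, pvCums_getD l 0 r (by omega)] at this
    omega
  · have hlt2 : pvCnt max 0 l < r := by omega
    -- cnt < r ≤ len: entry at cnt fits by h1 but pvCnt_at says it exceeds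
    have hclt : pvCnt max 0 l < l.length := by omega
    have := h1 (pvCnt max 0 l) hlt2
    rw [hcs, pvCums_getD l 0 (pvCnt max 0 l) hclt] at this
    have := pvCnt_at max l 0 hclt
    omega

theorem pvLenNonneg (context : List String) :
    ∀ x ∈ context.map (fun p => PySem.Str.len p), 0 ≤ x := by
  intro x hx
  simp only [List.mem_map] at hx
  obtain ⟨p, _, rfl⟩ := hx
  simp [PySem.Str.len_eq]

-- ===== VERDICT (by name: the statement is the Claim_ definition above) =====
theorem limit_context_length_spec : Claim_equal_limit_context_length := by
  intro context max_length _
  unfold Spec_limit_context_length limit_context_length limit_context_length_alt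
  simp only
  set l := context.map (fun p => PySem.Str.len p) with hl
  have hn : ∀ x ∈ l, 0 ≤ x := pvLenNonneg context
  have hfold : l.foldl (· + ·) 0 = l.sum := List.sum_eq_foldl.symm
  have hcum : pvCum [] 0 context = pvCums 0 l := by
    rw [pvCum_eq, hl]; simp only [List.nil_append]
  rw [hcum, pvBs_eq_cnt l max_length hn, hfold]
  have hllen : l.length = context.length := by simp [hl]
  by_cases htot : l.sum ≤ max_length
  · rw [if_pos htot]
    have := pvCnt_full max_length l hn 0 (by omega)
    rw [if_pos (by omega)]
  · rw [if_neg htot]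
    by_cases hnil : l = []
    · have h0 : context.length = 0 := by rw [← hllen, hnil]; rfl
      rw [hnil]
      simp [pvAGo, pvCnt, h0.symm]
    · have hpart := pvCnt_partial max_length l 0 hnil (by omega)
      rw [pvAGo_eq, if_pos hpart, if_neg (by omega)]
      simp
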